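-- pv_equiv track=rewrite | github.com/lukapapshvili/goa | day 79/home work/hw.py | nearest_leap_year
-- ===== SOURCE A (Python) =====
-- def is_leap_year(year):
--     return (year % 4 == 0 and year % 100 != 0) or (year % 400 == 0)
--
-- def nearest_leap_year(year):
--     # ვეძებთ უახლოეს ნაკიან წელს
--     up = year + 1
--     down = year - 1
--
--     while True:
--         if is_leap_year(down):
--             return down
--         if is_leap_year(up):
--             return up
--         up += 1
--         down -= 1
-- ===== SOURCE B (Python) =====
-- def is_leap_year(year):
--     return (year % 4 == 0 and year % 100 != 0) or (year % 400 == 0)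
--
-- def nearest_leap_year(year):
--     # two independent directional searches, then a distance comparison
--     prev = year - 1
--     while not is_leap_year(prev):
--         prev -= 1
--     next_ = year + 1
--     while not is_leap_year(next_):
--         next_ += 1
--     return prev if year - prev <= next_ - year else next_
-- ===== Notes on version B (the rewrite author's own statement) =====
-- stated objective: alternative
-- what changed: Replaces A's single interleaved down-then-up outward scan with two independent directional searches (nearest leap strictly below, nearest strictly above) followed by a distance comparison that ties toward the lower year.
import Mathlib
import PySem

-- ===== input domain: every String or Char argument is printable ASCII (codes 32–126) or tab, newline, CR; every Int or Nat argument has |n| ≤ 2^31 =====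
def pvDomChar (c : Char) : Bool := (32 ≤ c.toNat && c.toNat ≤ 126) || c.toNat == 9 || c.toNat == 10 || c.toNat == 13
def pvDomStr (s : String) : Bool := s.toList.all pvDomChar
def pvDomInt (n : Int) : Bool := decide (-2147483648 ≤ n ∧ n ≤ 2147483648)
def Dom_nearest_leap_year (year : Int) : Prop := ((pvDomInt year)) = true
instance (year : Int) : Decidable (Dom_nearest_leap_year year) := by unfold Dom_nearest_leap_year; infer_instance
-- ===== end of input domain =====

-- B replaces A's interleaved outward scan by two independent directional searches
-- plus a final distance comparison (tie toward the lower year); same cost.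

-- ===== PORT A =====
def is_leap_year (year : Int) : Bool :=
  (PySem.Int.mod year 4 == 0 && !(PySem.Int.mod year 100 == 0)) || PySem.Int.mod year 400 == 0

-- A's 'while True' outward scan, with fuel for termination (a leap year always
-- lies within 8 of any year, so fuel 100 is never exhausted on any input).
def nly_loop : Nat → Int → Int → Int
  | 0, down, _ => down
  | n+1, down, up =>
      if is_leap_year down then down
      else if is_leap_year up then up
      else nly_loop n (down - 1) (up + 1)

def nearest_leap_year (year : Int) : Int := nly_loop 100 (year - 1) (year + 1)

-- ===== PORT B =====
-- 'while not is_leap_year(prev): prev -= 1', with the same fuel bound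
def searchDown : Nat → Int → Int
  | 0, d => d
  | n+1, d => if is_leap_year d then d else searchDown n (d - 1)

def searchUp : Nat → Int → Int
  | 0, u => u
  | n+1, u => if is_leap_year u then u else searchUp n (u + 1)

def nearest_leap_year_alt (year : Int) : Int :=
  let prev := searchDown 100 (year - 1)
  let next := searchUp 100 (year + 1)
  if year - prev ≤ next - year then prev else next

-- ===== PRECONDITION & SPEC =====
def Spec_nearest_leap_year (year : Int) (out : Int) : Prop := out = nearest_leap_year_alt year
instance (year : Int) (out : Int) : Decidable (Spec_nearest_leap_year year out) := by unfold Spec_nearest_leap_year; infer_instance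

-- ===== CLAIM (what is proved, stated in full; the proofs are below) =====
def Claim_equal_nearest_leap_year : Prop := ∀ (year : Int), Dom_nearest_leap_year year → Spec_nearest_leap_year year (nearest_leap_year year)

-- ===== LEMMAS AND PROOFS =====

theorem searchDown_le : ∀ (n : Nat) (d : Int), searchDown n d ≤ d := by
  intro n
  induction n with
  | zero => intro d; simp [searchDown]
  | succ n ih =>
      intro d
      simp only [searchDown]
      split
      · exact le_refl d
      · exact le_trans (ih (d - 1)) (by omega)

theorem le_searchUp : ∀ (n : Nat) (u : Int), u ≤ searchUp n u := by
  intro n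
  induction n with
  | zero => intro u; simp [searchUp]
  | succ n ih =>
      intro u
      simp only [searchUp]
      split
      · exact le_refl u
      · exact le_trans (by omega) (ih (u + 1))

theorem nly_loop_eq : ∀ (n : Nat) (d u : Int),
    nly_loop n d u =
      if d - searchDown n d ≤ searchUp n u - u then searchDown n d else searchUp n u := by
  intro n
  induction n with
  | zero => intro d u; simp [nly_loop, searchDown, searchUp]
  | succ n ih =>
      intro d u
      simp only [nly_loop, searchDown, searchUp]
      by_cases hd : is_leap_year d = true
      · simp only [hd, if_true]
        have := le_searchUp n (u + 1)
        by_cases hu : is_leap_year u = true <;> simp [hu] <;> omega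
      · simp only [hd, Bool.false_eq_true, if_false]
        by_cases hu : is_leap_year u = true
        · simp only [hu, if_true]
          have h1 := searchDown_le n (d - 1)
          have h2 : ¬ (d - searchDown n (d - 1) ≤ u - u) := by omega
          rw [if_neg h2]
        · simp only [hu, Bool.false_eq_true, if_false, ih]
          have hcond : (d - 1 - searchDown n (d - 1) ≤ searchUp n (u + 1) - (u + 1)) ↔
              (d - searchDown n (d - 1) ≤ searchUp n (u + 1) - u) := by omega
          split_ifs with h1 h2 h2 <;> first | rfl | (exfalso; omega)

-- ===== VERDICT (by name: the statement is the Claim_ definition above) =====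
theorem nearest_leap_year_spec : Claim_equal_nearest_leap_year := by
  intro year _
  unfold Spec_nearest_leap_year nearest_leap_year nearest_leap_year_alt
  rw [nly_loop_eq]
  have hcond : (year - 1 - searchDown 100 (year - 1) ≤ searchUp 100 (year + 1) - (year + 1)) ↔
      (year - searchDown 100 (year - 1) ≤ searchUp 100 (year + 1) - year) := by omega
  simp only []
  split_ifs with h1 h2 h2 <;> first | rfl | (exfalso; exact h2 (hcond.mp h1)) | (exfalso; exact h1 (hcond.mpr h2))
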